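-- pv_equiv track=rewrite | github.com/Stanford-Health/wearable-notebooks | notebooks/withings_sleep.py | contiguous_regions
-- ===== SOURCE A (Python) =====
-- from itertools import groupby
-- from itertools import groupby
--
-- def contiguous_regions(a):
--     i = 0
--     res = []
--
--     for k, g in groupby(a):
--         l = len(list(g))
--         if k:
--             res.append((i,i+l))
--         i += l
--
--     return res
-- ===== SOURCE B (Python) =====
-- def contiguous_regions(a):
--     res = []
--     prev = None
--     for i, v in enumerate(a):
--         if v:
--             if v == prev:
--                 res[-1] = (res[-1][0], i + 1)  # same truthy run: widen the open region
--             else: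
--                 res.append((i, i + 1))        # new truthy run: open a unit region
--         prev = v
--     return res
-- ===== Notes on version B (the rewrite author's own statement) =====
-- stated objective: simpler
-- what changed: Drops itertools.groupby and its per-run consumption/offset bookkeeping for a single element-wise fold that opens a unit region at each new truthy value and widens the last region in place while the value repeats.
import Mathlib
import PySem

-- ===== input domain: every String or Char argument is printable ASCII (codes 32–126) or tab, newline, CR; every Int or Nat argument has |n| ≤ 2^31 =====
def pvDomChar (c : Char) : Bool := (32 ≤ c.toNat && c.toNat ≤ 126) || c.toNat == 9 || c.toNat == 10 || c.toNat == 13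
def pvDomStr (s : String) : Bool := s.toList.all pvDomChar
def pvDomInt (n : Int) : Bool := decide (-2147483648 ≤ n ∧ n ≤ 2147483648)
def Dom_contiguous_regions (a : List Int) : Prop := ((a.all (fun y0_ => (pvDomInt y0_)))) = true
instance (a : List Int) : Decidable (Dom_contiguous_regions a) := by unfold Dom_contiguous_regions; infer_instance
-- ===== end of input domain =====

-- B replaces A's groupby run-consumption loop by an element-wise fold that opens a unit region at each new truthy value and widens the last region while the value repeats (simpler, same cost).

-- ===== PORT A =====
-- itertools.groupby step: length of the maximal prefix of xs equal to k, and the remainder of the list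
def pvRun (k : Int) : List Int → Nat × List Int
  | [] => (0, [])
  | x :: xs =>
    if x = k then
      let r := pvRun k xs
      (r.1 + 1, r.2)
    else (0, x :: xs)

-- termination fact cited by pvLoopA's decreasing_by
theorem pvRun_len_le (k : Int) (xs : List Int) : (pvRun k xs).2.length ≤ xs.length := by
  induction xs with
  | nil => simp [pvRun]
  | cons x xs ih =>
    by_cases h : x = k
    · simp only [pvRun, if_pos h]
      simpa using Nat.le_succ_of_le ih
    · simp [pvRun, h]

-- the 'for k, g in groupby(a)' loop of A, with i and res as the loop state
def pvLoopA : List Int → Int → List (Int × Int) → List (Int × Int)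
  | [], _, res => res
  | x :: xs, i, res =>
    let r := pvRun x xs
    let l : Int := (r.1 : Int) + 1
    pvLoopA r.2 (i + l) (if x ≠ 0 then res ++ [(i, i + l)] else res)
termination_by a _ _ => a.length
decreasing_by simp only [List.length_cons]; exact Nat.lt_succ_of_le (pvRun_len_le x xs)

def contiguous_regions (a : List Int) : List (Int × Int) := pvLoopA a 0 []

-- ===== PORT B =====
-- enumerate(a) starting at index i
def pvEnum (i : Int) : List Int → List (Int × Int)
  | [] => []
  | x :: xs => (i, x) :: pvEnum (i + 1) xs

-- res[-1] = (res[-1][0], e): replace the end of the last pair (Python raises on []; that branch is never reached in B's loop)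
def pvSetLastEnd : List (Int × Int) → Int → List (Int × Int)
  | [], _ => []
  | [p], e => [(p.1, e)]
  | p :: q :: ps, e => p :: pvSetLastEnd (q :: ps) e

-- one iteration of B's loop; state = (res, prev)
def pvStepB (st : List (Int × Int) × Option Int) (iv : Int × Int) : List (Int × Int) × Option Int :=
  if iv.2 ≠ 0 then
    if some iv.2 = st.2 then (pvSetLastEnd st.1 (iv.1 + 1), some iv.2)
    else (st.1 ++ [(iv.1, iv.1 + 1)], some iv.2)
  else (st.1, some iv.2)

def contiguous_regions_alt (a : List Int) : List (Int × Int) :=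
  ((pvEnum 0 a).foldl pvStepB ([], none)).1

-- ===== PRECONDITION & SPEC =====
def Spec_contiguous_regions (a : List Int) (out : List (Int × Int)) : Prop := out = contiguous_regions_alt a
instance (a : List Int) (out : List (Int × Int)) : Decidable (Spec_contiguous_regions a out) := by unfold Spec_contiguous_regions; infer_instance

-- ===== CLAIM (what is proved, stated in full; the proofs are below) =====
def Claim_equal_contiguous_regions : Prop := ∀ (a : List Int), Dom_contiguous_regions a → Spec_contiguous_regions a (contiguous_regions a)

-- ===== LEMMAS AND PROOFS =====

theorem pvRun_decomp (k : Int) : ∀ xs : List Int,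
    xs = List.replicate (pvRun k xs).1 k ++ (pvRun k xs).2
  | [] => rfl
  | x :: xs => by
      by_cases h : x = k
      · have ih := pvRun_decomp k xs
        simp only [pvRun, if_pos h, List.replicate_succ, List.cons_append]
        rw [h]
        exact congrArg (List.cons k) ih
      · simp [pvRun, h]

theorem pvRun_head_ne (k : Int) : ∀ (xs : List Int) (y : Int) (t : List Int),
    (pvRun k xs).2 = y :: t → y ≠ k
  | [], y, t, h => by simp [pvRun] at h
  | x :: xs, y, t, h => by
      by_cases hx : x = k
      · simp only [pvRun, if_pos hx] at h
        exact pvRun_head_ne k xs y t h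
      · simp only [pvRun, if_neg hx] at h
        have : x = y := by injection h
        exact this ▸ hx

theorem pvEnum_append (u v : List Int) : ∀ i : Int,
    pvEnum i (u ++ v) = pvEnum i u ++ pvEnum (i + u.length) v := by
  induction u with
  | nil => intro i; simp [pvEnum]
  | cons x xs ih =>
      intro i
      simp only [List.cons_append, pvEnum, ih (i + 1), List.length_cons]
      have h : i + 1 + (xs.length : Int) = i + ((xs.length : Nat) + 1 : Nat) := by push_cast; ring
      rw [h]

theorem pvSetLastEnd_append (s e e' : Int) : ∀ res : List (Int × Int),
    pvSetLastEnd (res ++ [(s, e)]) e' = res ++ [(s, e')]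
  | [] => rfl
  | p :: rest => by
      cases rest with
      | nil => simp [pvSetLastEnd]
      | cons q rs =>
          have := pvSetLastEnd_append s e e' (q :: rs)
          simp only [List.cons_append] at this ⊢
          simp [pvSetLastEnd, this]

-- fold over a run of zeros: state res unchanged, prev becomes 0 (for nonempty runs it already is by the first step)
theorem pvFold_zeros (m : Nat) : ∀ (j : Int) (res : List (Int × Int)),
    (pvEnum j (List.replicate m 0)).foldl pvStepB (res, some 0) = (res, some 0) := by
  induction m with
  | zero => intro j res; simp [pvEnum]
  | succ n ih =>
      intro j res
      simp only [List.replicate_succ, pvEnum, List.foldl_cons]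
      rw [show pvStepB (res, some 0) (j, 0) = (res, some 0) from by simp [pvStepB]]
      exact ih (j + 1) res

-- fold over a run of m copies of x ≠ 0 with prev = x and an open region ending at j: it ends at j + m
theorem pvFold_pos (x : Int) (hx : x ≠ 0) (s : Int) : ∀ (m : Nat) (j : Int) (res : List (Int × Int)),
    (pvEnum j (List.replicate m x)).foldl pvStepB (res ++ [(s, j)], some x)
      = (res ++ [(s, j + m)], some x) := by
  intro m
  induction m with
  | zero => intro j res; simp [pvEnum]
  | succ n ih =>
      intro j res
      simp only [List.replicate_succ, pvEnum, List.foldl_cons]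
      rw [show pvStepB (res ++ [(s, j)], some x) (j, x)
            = (res ++ [(s, j + 1)], some x) from by
          simp [pvStepB, hx, pvSetLastEnd_append]]
      rw [ih (j + 1) res]
      rw [show j + 1 + (n : Int) = j + ((n : Nat) + 1 : Nat) from by push_cast; ring]

-- main invariant: B's fold from state (res, prev) over a enumerated from i computes A's loop,
-- provided prev differs from the head of a (true at every run boundary)
theorem pvMain : ∀ (n : Nat) (a : List Int), a.length = n →
    ∀ (i : Int) (res : List (Int × Int)) (prev : Option Int),
      (∀ x t, a = x :: t → prev ≠ some x) →
      ((pvEnum i a).foldl pvStepB (res, prev)).1 = pvLoopA a i res := by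
  intro n
  induction n using Nat.strong_induction_on with
  | _ n ih =>
    intro a ha i res prev hprev
    match a with
    | [] => simp [pvEnum, pvLoopA]
    | x :: xs =>
      obtain ⟨m, rest, hmr⟩ : ∃ m rest, pvRun x xs = (m, rest) := ⟨_, _, rfl⟩
      have hdec : x :: xs = List.replicate (m + 1) x ++ rest := by
        have h := pvRun_decomp x xs
        rw [hmr] at h
        rw [List.replicate_succ, List.cons_append]
        exact congrArg (List.cons x) h
      have hlt : rest.length < n := by
        have h1 : rest.length ≤ xs.length := by
          have := pvRun_len_le x xs
          rwa [hmr] at this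
        simp only [← ha, List.length_cons]
        omega
      have hhead : ∀ y t, rest = y :: t → (some x : Option Int) ≠ some y := by
        intro y t hyt h
        have hy : y ≠ x := pvRun_head_ne x xs y t (by rw [hmr, hyt])
        exact hy (Option.some.inj h).symm
      have hloopA : pvLoopA (x :: xs) i res
          = pvLoopA rest (i + ((m : Int) + 1))
              (if x ≠ 0 then res ++ [(i, i + ((m : Int) + 1))] else res) := by
        rw [pvLoopA]
        simp only [hmr]
      conv_lhs => rw [hdec]
      rw [pvEnum_append, List.foldl_append, List.length_replicate]
      by_cases hx : x = 0
      · subst hx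
        have hz : (pvEnum i (List.replicate (m + 1) 0)).foldl pvStepB (res, prev)
            = (res, some 0) := by
          simp only [List.replicate_succ, pvEnum, List.foldl_cons]
          rw [show pvStepB (res, prev) (i, 0) = (res, some 0) from by simp [pvStepB]]
          exact pvFold_zeros m (i + 1) res
        rw [hz, ih _ hlt rest rfl _ res (some 0) hhead, hloopA]
        simp only [ne_eq, not_true_eq_false, if_false]
        push_cast
        rfl
      · have hne : prev ≠ some x := hprev x xs rfl
        have hp : (pvEnum i (List.replicate (m + 1) x)).foldl pvStepB (res, prev)
            = (res ++ [(i, i + ((m : Int) + 1))], some x) := by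
          simp only [List.replicate_succ, pvEnum, List.foldl_cons]
          rw [show pvStepB (res, prev) (i, x) = (res ++ [(i, i + 1)], some x) from by
            simp [pvStepB, hx]
            intro h
            exact absurd h.symm hne]
          rw [pvFold_pos x hx i m (i + 1) res]
          rw [show i + 1 + (m : Int) = i + ((m : Int) + 1) from by ring]
        rw [hp, ih _ hlt rest rfl _ _ (some x) hhead, hloopA]
        rw [if_pos hx]
        push_cast
        rfl

-- ===== VERDICT (by name: the statement is the Claim_ definition above) =====
theorem contiguous_regions_spec : Claim_equal_contiguous_regions := by
  intro a _
  unfold Spec_contiguous_regions contiguous_regions contiguous_regions_alt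
  rw [pvMain a.length a rfl 0 [] none (by intro x t _ h; cases h)]
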